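-- pv_equiv track=rewrite | github.com/ChereGG/Popeye | backend/PopeyeBackend/preprocessing/fen_preprocessing.py | fen_to_sparse_matrix6
-- ===== SOURCE A (Python) =====
-- def fen_to_sparse_matrix6(fen):
--     piece_map = {
--         "P": [[0 for _ in range(8)] for _ in range(8)],
--         "R": [[0 for _ in range(8)] for _ in range(8)],
--         "N": [[0 for _ in range(8)] for _ in range(8)],
--         "B": [[0 for _ in range(8)] for _ in range(8)],
--         "K": [[0 for _ in range(8)] for _ in range(8)],
--         "Q": [[0 for _ in range(8)] for _ in range(8)],
--     }
--     records = fen.split()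
--     board = records[0]
--     position_rows = board.split("/")
--     contor = 0
--     for position_row in position_rows:
--         for potential_piece in position_row:
--             if potential_piece.isalpha():
--                 if potential_piece.isupper():
--                     piece_map[potential_piece][int(contor / 8)][contor % 8] = 1
--                 else:
--                     piece_map[potential_piece.upper()][int(contor / 8)][contor % 8] = -1
--                 contor += 1
--             else:
--                 contor += int(potential_piece)
--     return [piece_map["P"], piece_map["R"], piece_map["N"],
--             piece_map["B"], piece_map["K"], piece_map["Q"]]
-- ===== SOURCE B (Python) =====
-- def fen_to_sparse_matrix6(fen):
--     board = fen.split()[0]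
--     cells = []
--     for row in board.split("/"):
--         for ch in row:
--             if ch.isalpha():
--                 cells.append(ch)
--             else:
--                 cells += [None] * int(ch)
--     pad = (cells + [None] * 64)[:64]
--
--     def val(c, letter):
--         if c is None:
--             return 0
--         if c == letter:
--             return 1
--         if c == letter.lower():
--             return -1
--         return 0
--
--     return [[[val(pad[r * 8 + c], L) for c in range(8)] for r in range(8)]
--             for L in "PRNBKQ"]
-- ===== Notes on version B (the rewrite author's own statement) =====
-- stated objective: alternative
-- what changed: Replaces A's mutable six-matrix dict updated in place under a running counter by a two-pass functional pipeline: first expand the board into a flat 64-cell list (piece letters and None fillers), then build each of the six matrices directly by an index comprehension comparing the padded cell against the piece letter; no dict and no in-place assignment remain.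
import Mathlib
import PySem

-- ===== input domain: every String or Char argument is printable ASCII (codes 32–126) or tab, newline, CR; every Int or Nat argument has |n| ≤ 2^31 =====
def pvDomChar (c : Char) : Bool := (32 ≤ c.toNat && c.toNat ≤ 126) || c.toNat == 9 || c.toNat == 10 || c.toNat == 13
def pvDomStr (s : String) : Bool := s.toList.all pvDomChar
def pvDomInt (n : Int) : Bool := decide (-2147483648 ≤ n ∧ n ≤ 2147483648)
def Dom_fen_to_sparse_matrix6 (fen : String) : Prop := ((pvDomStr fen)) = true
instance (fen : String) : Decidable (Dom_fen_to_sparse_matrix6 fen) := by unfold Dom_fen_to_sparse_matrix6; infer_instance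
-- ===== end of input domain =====

-- B replaces A's in-place dict mutation under a running counter by a two-pass functional
-- pipeline (flat 64-cell expansion, then per-letter index comprehensions); same value on Pre_.

-- ===== PORT A =====
-- an 8x8 zero matrix, [[0 for _ in range(8)] for _ in range(8)]
def pvZeros : List (List Int) := List.replicate 8 (List.replicate 8 0)

-- piece_map[p][i][j] = v ; exact for i < 8 and j < 8 (Pre_ guarantees that; Python's
-- IndexError on a larger row index is excluded by Pre_)
def pvSetMat (m : List (List Int)) (i j : Nat) (v : Int) : List (List Int) :=
  m.set i ((m.getD i []).set j v)

-- the initial dict literal {"P": zeros, ..., "Q": zeros}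
def pvInit : PySem.Dict String (List (List Int)) :=
  PySem.Dict.ofList [("P", pvZeros), ("R", pvZeros), ("N", pvZeros),
                     ("B", pvZeros), ("K", pvZeros), ("Q", pvZeros)]

-- the body of A's inner loop, verbatim (state = (piece_map, contor))
def pvStepA (st : PySem.Dict String (List (List Int)) × Int) (potential_piece : Char) :
    PySem.Dict String (List (List Int)) × Int :=
  if PySem.Chars.isalpha potential_piece then
    -- int(contor/8): contor ≥ 0 always, so truncating division agrees with floordiv
    let i := (PySem.Int.floordiv st.2 8).toNat
    let j := (PySem.Int.mod st.2 8).toNat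
    if PySem.Chars.isupper potential_piece then
      -- piece_map[potential_piece][i][j] = 1 ; KeyError (letter outside the six keys)
      -- is excluded by Pre_, where Dict.modify inserts instead
      (st.1.modify (String.ofList [potential_piece]) [] (fun m => pvSetMat m i j 1), st.2 + 1)
    else
      (st.1.modify (String.ofList [PySem.Chars.upperChar potential_piece]) []
         (fun m => pvSetMat m i j (-1)), st.2 + 1)
  else
    -- contor += int(potential_piece); ValueError (non-digit) excluded by Pre_
    (st.1, st.2 + (PySem.Int.ofStr? (String.ofList [potential_piece])).getD 0)

def fen_to_sparse_matrix6 (fen : String) : List (List (List Int)) :=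
  let piece_map := pvInit
  let records := PySem.Str.split₀ fen
  let board := records.headD ""        -- records[0]; IndexError on an empty split excluded by Pre_
  -- board.split("/"); the separator is never "", so split? is never none
  let position_rows := (PySem.Str.split? board "/").getD []
  let st := position_rows.foldl
    (fun st position_row => position_row.toList.foldl pvStepA st) (piece_map, (0 : Int))
  [st.1.getD "P" [], st.1.getD "R" [], st.1.getD "N" [],
   st.1.getD "B" [], st.1.getD "K" [], st.1.getD "Q" []]

-- ===== PORT B =====
-- val(c, letter) from Source B
def pvVal (c : Option Char) (letter : Char) : Int :=
  match c with
  | none => 0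
  | some ch =>
    if ch = letter then 1
    else if ch = PySem.Chars.lowerChar letter then -1
    else 0

-- the body of Source B's expansion loop, verbatim (state = cells)
def pvCellsStep (cells : List (Option Char)) (ch : Char) : List (Option Char) :=
  if PySem.Chars.isalpha ch then cells ++ [some ch]
  -- cells += [None] * int(ch); ValueError excluded by Pre_
  else cells ++ List.replicate ((PySem.Int.ofStr? (String.ofList [ch])).getD 0).toNat none

def fen_to_sparse_matrix6_alt (fen : String) : List (List (List Int)) :=
  let board := (PySem.Str.split₀ fen).headD ""   -- fen.split()[0]; IndexError excluded by Pre_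
  -- board.split("/"); the separator is never "", so split? is never none
  let cells := ((PySem.Str.split? board "/").getD []).foldl
    (fun cells row => row.toList.foldl pvCellsStep cells) []
  let pad := (cells ++ List.replicate 64 none).take 64
  "PRNBKQ".toList.map (fun L =>
    (List.range 8).map (fun r =>
      (List.range 8).map (fun c => pvVal (pad.getD (r * 8 + c) none) L)))

-- ===== PRECONDITION & SPEC =====
-- the twelve FEN piece letters (the keys A's dict lookups can hit without KeyError)
def pvPieces : List Char := ['P', 'R', 'N', 'B', 'K', 'Q', 'p', 'r', 'n', 'b', 'k', 'q']

def pvDigits : List Char := ['0', '1', '2', '3', '4', '5', '6', '7', '8', '9']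

-- how far one board character advances A's counter
def pvCellW (c : Char) : Nat := if c ∈ pvPieces then 1 else c.toNat - 48

-- the board characters A's loops actually visit: first whitespace token, split on '/'
def pvBoardCells (fen : String) : List Char :=
  (((PySem.Str.split? ((PySem.Str.split₀ fen).headD "") "/").getD []).map String.toList).flatten

-- every piece letter is placed at a counter position < 64 (prefix-weight bound)
def pvOkB (n : Nat) (chs : List Char) : Bool :=
  (List.range chs.length).all (fun i =>
    !(pvPieces.contains (chs.getD i ' '))
      || decide (n + ((chs.take i).map pvCellW).sum < 64))

-- Pre_ = exactly the inputs where Python A returns: a board token exists (else IndexError),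
-- every board character is a piece letter or a digit (else ValueError/KeyError), and every
-- piece letter falls at a counter position < 64 (else IndexError on the row index)
def Pre_fen_to_sparse_matrix6 (fen : String) : Prop :=
  PySem.Str.split₀ fen ≠ [] ∧
  ((pvBoardCells fen).all (fun c => pvPieces.contains c || pvDigits.contains c)) = true ∧
  pvOkB 0 (pvBoardCells fen) = true

instance (fen : String) : Decidable (Pre_fen_to_sparse_matrix6 fen) := by
  unfold Pre_fen_to_sparse_matrix6; infer_instance

def pvWitness_fen_to_sparse_matrix6 : String := "Kq/2n w -"

def Spec_fen_to_sparse_matrix6 (fen : String) (out : List (List (List Int))) : Prop := out = fen_to_sparse_matrix6_alt fen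
instance (fen : String) (out : List (List (List Int))) : Decidable (Spec_fen_to_sparse_matrix6 fen out) := by unfold Spec_fen_to_sparse_matrix6; infer_instance

-- ===== CLAIM (what is proved, stated in full; the proofs are below) =====
def Claim_equal_fen_to_sparse_matrix6 : Prop := ∀ (fen : String), Dom_fen_to_sparse_matrix6 fen → Pre_fen_to_sparse_matrix6 fen → Spec_fen_to_sparse_matrix6 fen (fen_to_sparse_matrix6 fen)

-- ===== LEMMAS AND PROOFS =====

-- the Prop form of the prefix-weight bound, used by the induction
def pvOk (n : Nat) (chs : List Char) : Prop :=
  ∀ i ∈ List.range chs.length, chs.getD i ' ' ∈ pvPieces →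
    n + ((chs.take i).map pvCellW).sum < 64

lemma pvOkB_sound {n : Nat} {chs : List Char} (h : pvOkB n chs = true) : pvOk n chs := by
  intro i hi hc
  have hx := List.all_eq_true.mp h i hi
  rcases (Bool.or_eq_true _ _).mp hx with h1 | h2
  · exact absurd hc (by simpa [List.contains_iff_mem] using h1)
  · exact of_decide_eq_true h2


-- B's expansion of one board character
def pvExpand1 (c : Char) : List (Option Char) :=
  if PySem.Chars.isalpha c then [some c]
  else List.replicate ((PySem.Int.ofStr? (String.ofList [c])).getD 0).toNat none

def pvUppers : List Char := ['P', 'R', 'N', 'B', 'K', 'Q']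

def pvPadGet (cells : List (Option Char)) (k : Nat) : Option Char :=
  ((cells ++ List.replicate 64 none).take 64).getD k none

def pvMat (cells : List (Option Char)) (L : Char) : List (List Int) :=
  (List.range 8).map (fun r => (List.range 8).map (fun c => pvVal (pvPadGet cells (r * 8 + c)) L))

def pvInv (d : PySem.Dict String (List (List Int))) (cells : List (Option Char)) : Prop :=
  ∀ L ∈ pvUppers, d.getD (String.ofList [L]) [] = pvMat cells L

lemma pvPadGet_eq (cells : List (Option Char)) (k : Nat) :
    pvPadGet cells k = if k < 64 then (cells[k]?).getD none else none := by
  unfold pvPadGet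
  rw [List.getD_eq_getElem?_getD, List.getElem?_take]
  by_cases h64 : k < 64
  · simp only [if_pos h64]
    by_cases hl : k < cells.length
    · rw [List.getElem?_append_left hl]
    · rw [List.getElem?_append_right (le_of_not_gt hl)]
      rw [List.getElem?_eq_none (le_of_not_gt hl)]
      rw [List.getElem?_replicate]
      split_ifs <;> rfl
  · simp [if_neg h64]

lemma pvPadGet_snoc (cells : List (Option Char)) (c : Option Char) (k : Nat) :
    pvPadGet (cells ++ [c]) k
      = if k = cells.length ∧ k < 64 then c else pvPadGet cells k := by
  rw [pvPadGet_eq, pvPadGet_eq]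
  by_cases h64 : k < 64
  · simp only [if_pos h64]
    by_cases hl : k < cells.length
    · rw [List.getElem?_append_left hl, if_neg (by omega)]
    · by_cases he : k = cells.length
      · subst he
        rw [List.getElem?_append_right (le_refl _)]
        simp [h64]
      · rw [List.getElem?_append_right (le_of_not_gt hl)]
        rw [List.getElem?_eq_none (le_of_not_gt hl), if_neg (by simp [he])]
        rw [List.getElem?_singleton, if_neg (by omega)]
  · simp [h64]

lemma pvMat_congr (cells cells' : List (Option Char)) (L : Char)
    (h : ∀ k, k < 64 → pvVal (pvPadGet cells k) L = pvVal (pvPadGet cells' k) L) :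
    pvMat cells L = pvMat cells' L := by
  unfold pvMat
  refine List.map_congr_left ?_
  intro r hr
  refine List.map_congr_left ?_
  intro c hc
  simp only [List.mem_range] at hr hc
  exact h _ (by omega)

lemma pvMat_append_nones (cells : List (Option Char)) (w : Nat) (L : Char) :
    pvMat (cells ++ List.replicate w none) L = pvMat cells L := by
  refine pvMat_congr _ _ _ (fun k hk => ?_)
  rw [pvPadGet_eq, pvPadGet_eq]
  simp only [if_pos hk]
  by_cases hl : k < cells.length
  · rw [List.getElem?_append_left hl]
  · rw [List.getElem?_append_right (le_of_not_gt hl)]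
    rw [List.getElem?_eq_none (le_of_not_gt hl)]
    rw [List.getElem?_replicate]
    split_ifs <;> rfl

lemma pvMat_snoc_other (cells : List (Option Char)) (c : Char) (L : Char)
    (h0 : pvVal (some c) L = 0) :
    pvMat (cells ++ [some c]) L = pvMat cells L := by
  refine pvMat_congr _ _ _ (fun k hk => ?_)
  rw [pvPadGet_snoc]
  split_ifs with h
  · rw [h0, pvPadGet_eq, if_pos h.2, List.getElem?_eq_none (by omega)]
    rfl
  · rfl

lemma pvMat_snoc_self (cells : List (Option Char)) (c : Char) (L : Char)
    (h : cells.length < 64) :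
    pvMat (cells ++ [some c]) L
      = pvSetMat (pvMat cells L) (cells.length / 8) (cells.length % 8) (pvVal (some c) L) := by
  unfold pvMat pvSetMat
  have hi : cells.length / 8 < 8 := by omega
  have hrow : ((List.range 8).map
      (fun r => (List.range 8).map (fun cc => pvVal (pvPadGet cells (r * 8 + cc)) L))).getD
        (cells.length / 8) []
      = (List.range 8).map (fun cc => pvVal (pvPadGet cells (cells.length / 8 * 8 + cc)) L) := by
    rw [List.getD_eq_getElem _ _ (by simpa using hi)]
    simp
  rw [hrow]
  apply List.ext_getElem
  · simp
  intro r h1 h2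
  simp only [List.length_map, List.length_range] at h1
  rw [List.getElem_set]
  rw [List.getElem_map, List.getElem_range]
  by_cases hr : cells.length / 8 = r
  · rw [if_pos hr]
    apply List.ext_getElem
    · simp
    intro cc h3 h4
    simp only [List.length_map, List.length_range] at h3
    rw [List.getElem_set]
    rw [List.getElem_map, List.getElem_range, List.getElem_map, List.getElem_range]
    rw [pvPadGet_snoc]
    by_cases hcc : cells.length % 8 = cc
    · rw [if_pos hcc, if_pos (by constructor <;> omega)]
    · rw [if_neg hcc, if_neg (by rintro ⟨he, -⟩; omega), hr]
  · rw [if_neg hr]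
    rw [List.getElem_map, List.getElem_range]
    refine List.map_congr_left ?_
    intro cc hcc
    simp only [List.mem_range] at hcc
    rw [pvPadGet_snoc, if_neg (by rintro ⟨he, -⟩; omega)]

set_option maxRecDepth 8192 in
lemma pvPiece_facts (c : Char) (hc : c ∈ pvPieces) :
    PySem.Chars.isalpha c = true ∧ PySem.Chars.upperChar c ∈ pvUppers ∧
    (PySem.Chars.isupper c = true → PySem.Chars.upperChar c = c) ∧
    pvVal (some c) (PySem.Chars.upperChar c) = (if PySem.Chars.isupper c then 1 else -1) ∧
    (∀ L ∈ pvUppers, L ≠ PySem.Chars.upperChar c → pvVal (some c) L = 0) := by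
  fin_cases hc <;>
    exact ⟨by decide, by decide, by decide, by decide, by intro L hL; fin_cases hL <;> decide⟩

set_option maxRecDepth 8192 in
lemma pvDigit_facts (c : Char) (hd : c ∈ pvDigits) :
    PySem.Chars.isalpha c = false ∧
    (PySem.Int.ofChars? [c]).getD 0 = ((c.toNat - 48 : Nat) : Int) ∧
    c ∉ pvPieces := by
  fin_cases hd <;> refine ⟨by decide, by decide, by decide⟩

lemma pvOk_head {n : Nat} {c : Char} {cs : List Char} (h : pvOk n (c :: cs))
    (hc : c ∈ pvPieces) : n < 64 := by
  have := h 0 (by simp) (by simpa using hc)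
  simpa using this

lemma pvOk_cons {n : Nat} {c : Char} {cs : List Char} (h : pvOk n (c :: cs)) :
    pvOk (n + pvCellW c) cs := by
  intro i hi hc
  simp only [List.mem_range] at hi
  have := h (i + 1) (by simp; omega) (by simpa using hc)
  simp only [List.take_succ_cons, List.map_cons, List.sum_cons] at this
  omega

lemma pvMain (chs : List Char) : ∀ (cells : List (Option Char)) d,
    (∀ c ∈ chs, c ∈ pvPieces ∨ c ∈ pvDigits) →
    pvOk cells.length chs →
    pvInv d cells →
    (chs.foldl pvStepA (d, (cells.length : Int))).2
        = ((cells ++ chs.flatMap pvExpand1).length : Int)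
    ∧ pvInv (chs.foldl pvStepA (d, (cells.length : Int))).1 (cells ++ chs.flatMap pvExpand1) := by
  induction chs with
  | nil => intro cells d _ _ hinv; simpa using hinv
  | cons c cs ih =>
    intro cells d hv hok hinv
    rcases hv c (by simp) with hc | hd
    · -- piece letter
      obtain ⟨halpha, hU, hupeq, hval, hval0⟩ := pvPiece_facts c hc
      have hlt : cells.length < 64 := pvOk_head hok hc
      have hW : pvCellW c = 1 := by simp [pvCellW, hc]
      have hexp : pvExpand1 c = [some c] := by simp [pvExpand1, halpha]
      have he1 : (((cells.length : Int)) / 8).toNat = cells.length / 8 := by omega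
      have he2 : (((cells.length : Int)) % 8).toNat = cells.length % 8 := by omega
      have hstep : pvStepA (d, (cells.length : Int)) c
          = (d.modify (String.ofList [PySem.Chars.upperChar c]) []
              (fun m => pvSetMat m (cells.length / 8) (cells.length % 8)
                (pvVal (some c) (PySem.Chars.upperChar c))), ((cells.length : Int) + 1)) := by
        rw [hval]
        by_cases hu : PySem.Chars.isupper c
        · rw [if_pos hu, hupeq hu]
          simp [pvStepA, halpha, hu, he1, he2]
        · rw [if_neg hu]
          simp [pvStepA, halpha, hu, he1, he2]
      have hinv' : pvInv (d.modify (String.ofList [PySem.Chars.upperChar c]) []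
          (fun m => pvSetMat m (cells.length / 8) (cells.length % 8)
            (pvVal (some c) (PySem.Chars.upperChar c))))
          (cells ++ [some c]) := by
        intro L hL
        by_cases hLU : L = PySem.Chars.upperChar c
        · rw [hLU, PySem.Dict.getD_modify_self, hinv _ hU, ← pvMat_snoc_self _ _ _ hlt]
        · have hne : String.ofList [L] ≠ String.ofList [PySem.Chars.upperChar c] := by
            intro he
            apply hLU
            have := congrArg String.toList he
            simpa using this
          rw [PySem.Dict.getD_modify_of_ne (hne := hne), hinv L hL,
            pvMat_snoc_other _ _ _ (hval0 L hL hLU)]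
      have hok' : pvOk (cells ++ [some c]).length cs := by
        have := pvOk_cons hok
        simpa [hW] using this
      have := ih (cells ++ [some c])
        (d.modify (String.ofList [PySem.Chars.upperChar c]) []
          (fun m => pvSetMat m (cells.length / 8) (cells.length % 8)
            (pvVal (some c) (PySem.Chars.upperChar c))))
        (fun x hx => hv x (by simp [hx])) hok' hinv'
      rw [List.foldl_cons, hstep]
      have hlen : ((cells ++ [some c]).length : Int) = (cells.length : Int) + 1 := by
        simp
      rw [← hlen]
      rw [List.flatMap_cons, hexp, ← List.append_assoc]
      exact this
    · -- digit
      obtain ⟨halpha, hint, hnp⟩ := pvDigit_facts c hd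
      have hW : pvCellW c = c.toNat - 48 := by simp [pvCellW, hnp]
      have hexp : pvExpand1 c = List.replicate (c.toNat - 48) none := by
        simp [pvExpand1, halpha, hint]
      
      have hstep : pvStepA (d, (cells.length : Int)) c
          = (d, ((cells ++ List.replicate (c.toNat - 48) none).length : Int)) := by
        unfold pvStepA
        rw [if_neg (by simp [halpha])]
        simp [hint]
      have hinv' : pvInv d (cells ++ List.replicate (c.toNat - 48) none) := by
        intro L hL
        rw [hinv L hL, pvMat_append_nones]
      have hok' : pvOk (cells ++ List.replicate (c.toNat - 48) none).length cs := by
        have := pvOk_cons hok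
        simpa [hW] using this
      have := ih (cells ++ List.replicate (c.toNat - 48) none) d
        (fun x hx => hv x (by simp [hx])) hok' hinv'
      rw [List.foldl_cons, hstep]
      rw [List.flatMap_cons, hexp, ← List.append_assoc]
      exact this


-- pvCellsStep appends pvExpand1 of the character
lemma pvCellsStep_eq (cells : List (Option Char)) (c : Char) :
    pvCellsStep cells c = cells ++ pvExpand1 c := by
  unfold pvCellsStep pvExpand1
  split_ifs <;> rfl

-- a nested fold over rows' characters is a fold over the flattened character list
lemma foldl_rows {σ : Type} (f : σ → Char → σ) (rows : List String) (init : σ) :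
    rows.foldl (fun st row => row.toList.foldl f st) init
      = ((rows.map String.toList).flatten).foldl f init := by
  rw [List.foldl_flatten, List.foldl_map]

set_option maxRecDepth 8192 in
lemma pvInit_inv : pvInv pvInit [] := by
  intro L hL
  fin_cases hL <;> decide

lemma portA_eq (fen : String) :
    fen_to_sparse_matrix6 fen =
      [((pvBoardCells fen).foldl pvStepA (pvInit, 0)).1.getD "P" [],
       ((pvBoardCells fen).foldl pvStepA (pvInit, 0)).1.getD "R" [],
       ((pvBoardCells fen).foldl pvStepA (pvInit, 0)).1.getD "N" [],
       ((pvBoardCells fen).foldl pvStepA (pvInit, 0)).1.getD "B" [],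
       ((pvBoardCells fen).foldl pvStepA (pvInit, 0)).1.getD "K" [],
       ((pvBoardCells fen).foldl pvStepA (pvInit, 0)).1.getD "Q" []] := by
  dsimp only [fen_to_sparse_matrix6, pvBoardCells]
  rw [foldl_rows]

lemma portB_eq (fen : String) :
    fen_to_sparse_matrix6_alt fen =
      [pvMat ((pvBoardCells fen).flatMap pvExpand1) 'P',
       pvMat ((pvBoardCells fen).flatMap pvExpand1) 'R',
       pvMat ((pvBoardCells fen).flatMap pvExpand1) 'N',
       pvMat ((pvBoardCells fen).flatMap pvExpand1) 'B',
       pvMat ((pvBoardCells fen).flatMap pvExpand1) 'K',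
       pvMat ((pvBoardCells fen).flatMap pvExpand1) 'Q'] := by
  dsimp only [fen_to_sparse_matrix6_alt, pvBoardCells]
  rw [show pvCellsStep = (fun (acc : List (Option Char)) c => acc ++ pvExpand1 c) from
    funext fun acc => funext fun c => pvCellsStep_eq acc c]
  rw [foldl_rows, PySem.List.foldl_append_eq_flatMap]
  simp [pvMat, pvPadGet]

-- ===== VERDICT (by name: the statement is the Claim_ definition above) =====
theorem fen_to_sparse_matrix6_spec : Claim_equal_fen_to_sparse_matrix6 := by
  intro fen _ hpre
  obtain ⟨-, hv, hok⟩ := hpre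
  unfold Spec_fen_to_sparse_matrix6
  rw [portA_eq, portB_eq]
  have hv' : ∀ c ∈ pvBoardCells fen, c ∈ pvPieces ∨ c ∈ pvDigits := by
    simpa [List.all_eq_true, List.contains_iff_mem] using hv
  obtain ⟨-, hinv⟩ := pvMain (pvBoardCells fen) [] pvInit hv' (pvOkB_sound hok) pvInit_inv
  simp only [List.length_nil, Nat.cast_zero, List.nil_append] at hinv
  have eP : ("P" : String) = String.ofList ['P'] := rfl
  have eR : ("R" : String) = String.ofList ['R'] := rfl
  have eN : ("N" : String) = String.ofList ['N'] := rfl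
  have eB : ("B" : String) = String.ofList ['B'] := rfl
  have eK : ("K" : String) = String.ofList ['K'] := rfl
  have eQ : ("Q" : String) = String.ofList ['Q'] := rfl
  rw [eP, eR, eN, eB, eK, eQ,
    hinv 'P' (by decide), hinv 'R' (by decide), hinv 'N' (by decide),
    hinv 'B' (by decide), hinv 'K' (by decide), hinv 'Q' (by decide)]
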